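-- pv_equiv track=rewrite | github.com/johnsamuelwrites/mlscores | mlscores/scores.py | get_properties_without_translations_in_languages
-- ===== SOURCE A (Python) =====
-- def get_properties_without_translations_in_languages(properties, languages):
--     """
--     Find properties that do not have translations in specific languages.
--
--     This function takes a list of properties with their corresponding languages and a list of languages,
--     and returns a dictionary where the keys are the languages and the values are the properties that do not have translations in those languages.
--
--     Args:
--         properties (list): A list of tuples containing the property, its value, and its language.
--         languages (list): A list of languages.
--
--     Returns:
--         A dictionary where the keys are the languages and the values are the properties that do not have translations in those languages.
--     """
--     # Create a dictionary to store the languages for each property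
--     properties_without_translations = {}
--     for prop, _, lang in properties:
--         if prop not in properties_without_translations:
--             properties_without_translations[prop] = set()
--         properties_without_translations[prop].add(lang)
--
--     # Find properties that do not have translations in the specified languages
--     missing_translations = {}
--     for lang in languages:
--         for prop, langs in properties_without_translations.items():
--             if lang not in langs:
--                 if lang not in missing_translations:
--                     missing_translations[lang] = set()
--                 missing_translations[lang].add(prop)
--
--     return missing_translations
-- ===== SOURCE B (Python) =====
-- def get_properties_without_translations_in_languages(properties, languages):
--     # Inverted index: language -> set of properties having a translation in it,
--     # plus the set of all properties; then one set difference per language.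
--     have = {}
--     all_props = set()
--     for prop, _, lang in properties:
--         all_props.add(prop)
--         have.setdefault(lang, set()).add(prop)
--     missing_translations = {}
--     for lang in languages:
--         missing = all_props - have.get(lang, set())
--         if missing:
--             missing_translations[lang] = missing
--     return missing_translations
-- ===== Notes on version B (the rewrite author's own statement) =====
-- stated objective: alternative
-- what changed: A groups languages per property and then, for every language, rescans every property's language-set; B builds an inverted index (language -> set of properties translated in it) plus the set of all properties in one pass, and answers each language with a single set difference, keeping a key only when the difference is non-empty.
import Mathlib
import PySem

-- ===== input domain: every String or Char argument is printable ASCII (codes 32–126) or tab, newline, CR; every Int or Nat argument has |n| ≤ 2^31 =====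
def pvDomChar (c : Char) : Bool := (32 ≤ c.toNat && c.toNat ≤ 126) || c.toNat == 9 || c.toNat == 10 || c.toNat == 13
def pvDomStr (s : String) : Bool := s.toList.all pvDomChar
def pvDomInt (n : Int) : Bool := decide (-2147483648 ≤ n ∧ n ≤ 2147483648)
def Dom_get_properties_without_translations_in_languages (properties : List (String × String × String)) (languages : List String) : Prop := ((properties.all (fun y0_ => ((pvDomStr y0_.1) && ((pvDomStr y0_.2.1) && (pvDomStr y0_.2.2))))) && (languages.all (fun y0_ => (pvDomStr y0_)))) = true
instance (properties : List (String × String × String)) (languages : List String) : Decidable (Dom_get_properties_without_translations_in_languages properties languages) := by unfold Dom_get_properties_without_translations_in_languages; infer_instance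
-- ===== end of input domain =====

-- B replaces A's per-language rescan of all property language-sets by an inverted index
-- (language -> set of properties translated in it) and one set difference per language (objective: alternative).

-- ===== PORT A =====
def get_properties_without_translations_in_languages (properties : List (String × String × String)) (languages : List String) : List (String × List String) :=
  let properties_without_translations : PySem.Dict String (PySem.Set String) :=
    properties.foldl (fun d t =>
      let d := if d.contains t.1 then d else d.insert t.1 PySem.Set.empty
      d.modify t.1 PySem.Set.empty (fun s => PySem.Set.add s t.2.2)) PySem.Dict.empty
  let missing_translations : PySem.Dict String (PySem.Set String) :=
    languages.foldl (fun m lang =>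
      properties_without_translations.items.foldl (fun m pl =>
        if !(PySem.Set.contains pl.2 lang) then
          let m := if m.contains lang then m else m.insert lang PySem.Set.empty
          m.modify lang PySem.Set.empty (fun s => PySem.Set.add s pl.1)
        else m) m) PySem.Dict.empty
  missing_translations.items

-- ===== PORT B =====
def get_properties_without_translations_in_languages_alt (properties : List (String × String × String)) (languages : List String) : List (String × List String) :=
  let st : PySem.Dict String (PySem.Set String) × PySem.Set String :=
    properties.foldl (fun st t =>
      (st.1.modify t.2.2 PySem.Set.empty (fun s => PySem.Set.add s t.1),
       PySem.Set.add st.2 t.1)) (PySem.Dict.empty, PySem.Set.empty)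
  let missing_translations : PySem.Dict String (PySem.Set String) :=
    languages.foldl (fun m lang =>
      let missing := PySem.Set.diff st.2 (st.1.getD lang PySem.Set.empty)
      if !missing.isEmpty then m.insert lang missing else m) PySem.Dict.empty
  missing_translations.items

-- ===== PRECONDITION & SPEC =====
def Spec_get_properties_without_translations_in_languages (properties : List (String × String × String)) (languages : List String) (out : List (String × List String)) : Prop := out = get_properties_without_translations_in_languages_alt properties languages
instance (properties : List (String × String × String)) (languages : List String) (out : List (String × List String)) : Decidable (Spec_get_properties_without_translations_in_languages properties languages out) := by unfold Spec_get_properties_without_translations_in_languages; infer_instance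

-- ===== CLAIM (what is proved, stated in full; the proofs are below) =====
def Claim_equal_get_properties_without_translations_in_languages : Prop := ∀ (properties : List (String × String × String)) (languages : List String), Dom_get_properties_without_translations_in_languages properties languages → Spec_get_properties_without_translations_in_languages properties languages (get_properties_without_translations_in_languages properties languages)

-- ===== LEMMAS AND PROOFS =====

-- A's grouping dict (prop -> set of languages), in its normalised modify form
def pvPwt (ps : List (String × String × String)) : PySem.Dict String (PySem.Set String) :=
  ps.foldl (fun d t => d.modify t.1 PySem.Set.empty (fun s => PySem.Set.add s t.2.2)) PySem.Dict.empty

-- B's inverted index (language -> set of props)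
def pvHave (ps : List (String × String × String)) : PySem.Dict String (PySem.Set String) :=
  ps.foldl (fun d t => d.modify t.2.2 PySem.Set.empty (fun s => PySem.Set.add s t.1)) PySem.Dict.empty

-- the set of all properties
def pvAll (ps : List (String × String × String)) : PySem.Set String :=
  PySem.Set.ofList (ps.map (·.1))

-- the props missing language l
def pvMiss (ps : List (String × String × String)) (l : String) : PySem.Set String :=
  PySem.Set.diff (pvAll ps) ((pvHave ps).getD l PySem.Set.empty)

theorem modify_eq_insert (d : PySem.Dict String (PySem.Set String)) (k : String)
    (f : PySem.Set String → PySem.Set String) :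
    d.modify k PySem.Set.empty f = d.insert k (f (d.getD k PySem.Set.empty)) := rfl

theorem diff_eq_filter (s t : PySem.Set String) :
    PySem.Set.diff s t = s.filter (fun x => !(PySem.Set.contains t x)) := rfl

-- A's "ensure the key exists, then d[k].add(...)" is a plain modify
theorem step_norm (d : PySem.Dict String (PySem.Set String)) (k : String)
    (f : PySem.Set String → PySem.Set String) :
    (if d.contains k then d else d.insert k PySem.Set.empty).modify k PySem.Set.empty f
      = d.modify k PySem.Set.empty f := by
  by_cases h : d.contains k
  · simp [h]
  · simp only [Bool.not_eq_true] at h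
    simp only [h, if_neg Bool.false_ne_true, modify_eq_insert,
      PySem.Dict.getD_insert_self, PySem.Dict.insert_insert_self,
      PySem.Dict.getD_of_not_contains d PySem.Set.empty h]

theorem phase1A (ps : List (String × String × String)) :
    ps.foldl (fun d t =>
        let d := if d.contains t.1 then d else d.insert t.1 PySem.Set.empty
        d.modify t.1 PySem.Set.empty (fun s => PySem.Set.add s t.2.2)) PySem.Dict.empty
      = pvPwt ps := by
  unfold pvPwt
  simp only [step_norm]

theorem phase1B_aux (ps : List (String × String × String))
    (d : PySem.Dict String (PySem.Set String)) (s : PySem.Set String) :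
    ps.foldl (fun st t =>
        (st.1.modify t.2.2 PySem.Set.empty (fun s => PySem.Set.add s t.1),
         PySem.Set.add st.2 t.1)) (d, s)
      = (ps.foldl (fun d t => d.modify t.2.2 PySem.Set.empty (fun s => PySem.Set.add s t.1)) d,
         ps.foldl (fun s t => PySem.Set.add s t.1) s) := by
  induction ps generalizing d s with
  | nil => rfl
  | cons t rest ih => simp only [List.foldl_cons, ih]

theorem phase1B (ps : List (String × String × String)) :
    ps.foldl (fun st t =>
        (st.1.modify t.2.2 PySem.Set.empty (fun s => PySem.Set.add s t.1),
         PySem.Set.add st.2 t.1)) (PySem.Dict.empty, PySem.Set.empty)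
      = (pvHave ps, pvAll ps) := by
  rw [phase1B_aux]
  unfold pvHave pvAll
  rw [← PySem.Set.update_map_eq_foldl_add, PySem.Set.update_empty]

theorem keys_pwt (ps : List (String × String × String)) : (pvPwt ps).keys = pvAll ps := by
  unfold pvPwt pvAll
  rw [PySem.Dict.keys_foldl_modify_key ps (fun t => t.1) PySem.Set.empty
      (fun _ t => fun s => PySem.Set.add s t.2.2)]
  rw [PySem.Dict.keys_empty, PySem.Set.update_nil_left]

theorem nodup_keys_pwt (ps : List (String × String × String)) : (pvPwt ps).keys.Nodup := by
  rw [keys_pwt]; exact PySem.Set.nodup_ofList _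

-- membership correspondence between the two phase-1 indexes
theorem mem_corr_aux (ps : List (String × String × String))
    (d h : PySem.Dict String (PySem.Set String))
    (H : ∀ l p, l ∈ d.getD p PySem.Set.empty ↔ p ∈ h.getD l PySem.Set.empty) :
    ∀ l p, l ∈ (ps.foldl (fun d t => d.modify t.1 PySem.Set.empty (fun s => PySem.Set.add s t.2.2)) d).getD p PySem.Set.empty
      ↔ p ∈ (ps.foldl (fun d t => d.modify t.2.2 PySem.Set.empty (fun s => PySem.Set.add s t.1)) h).getD l PySem.Set.empty := by
  induction ps generalizing d h with
  | nil => exact H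
  | cons t rest ih =>
    simp only [List.foldl_cons]
    apply ih
    intro l p
    rw [PySem.Dict.getD_modify, PySem.Dict.getD_modify]
    by_cases hp : p = t.1
    · by_cases hl : l = t.2.2
      · subst hp; subst hl
        rw [if_pos rfl, if_pos rfl]
        simp [PySem.Set.mem_add]
      · subst hp
        rw [if_pos rfl, if_neg hl, PySem.Set.mem_add]
        simp only [hl, or_false]
        exact H l t.1
    · by_cases hl : l = t.2.2
      · subst hl
        rw [if_neg hp, if_pos rfl, PySem.Set.mem_add]
        simp only [hp, or_false]
        exact H t.2.2 p
      · rw [if_neg hp, if_neg hl]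
        exact H l p

theorem mem_corr (ps : List (String × String × String)) (l p : String) :
    l ∈ (pvPwt ps).getD p PySem.Set.empty ↔ p ∈ (pvHave ps).getD l PySem.Set.empty := by
  unfold pvPwt pvHave
  exact mem_corr_aux ps _ _ (by simp [PySem.Dict.getD_empty]) l p

-- A's per-language scan of the grouping dict selects exactly pvMiss
theorem missA_eq (ps : List (String × String × String)) (lang : String) :
    ((pvPwt ps).items.filter (fun pl => !(PySem.Set.contains pl.2 lang))).map (·.1)
      = pvMiss ps lang := by
  rw [PySem.Dict.items_eq_map_keys (pvPwt ps) (nodup_keys_pwt ps) PySem.Set.empty,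
      List.filter_map, List.map_map]
  unfold pvMiss
  rw [diff_eq_filter, ← keys_pwt ps]
  have : ((fun x : String × PySem.Set String => x.1) ∘ fun k => (k, (pvPwt ps).getD k PySem.Set.empty)) = id := rfl
  rw [this, List.map_id]
  apply List.filter_congr
  intro p _
  simp only [Function.comp]
  congr 1
  rw [Bool.eq_iff_iff, PySem.Set.contains_iff, PySem.Set.contains_iff]
  exact mem_corr ps lang p

-- loop of repeated adds at the same key
theorem foldl_modify_add (l : List String) (k : String) :
    ∀ (m : PySem.Dict String (PySem.Set String)), l ≠ [] →
      l.foldl (fun m p => m.modify k PySem.Set.empty (fun s => PySem.Set.add s p)) m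
        = m.insert k (PySem.Set.update (m.getD k PySem.Set.empty) l) := by
  induction l with
  | nil => intro m h; exact absurd rfl h
  | cons p rest ih =>
    intro m _
    simp only [List.foldl_cons]
    by_cases hr : rest = []
    · subst hr
      simp only [List.foldl_nil, modify_eq_insert, PySem.Set.update_cons, PySem.Set.update_nil]
    · rw [ih _ hr, modify_eq_insert, PySem.Dict.getD_insert_self,
        PySem.Dict.insert_insert_self, ← PySem.Set.update_cons]

theorem nodup_miss (ps : List (String × String × String)) (lang : String) :
    (pvMiss ps lang).Nodup := by
  unfold pvMiss
  exact PySem.Set.nodup_diff _ _ (PySem.Set.nodup_ofList _)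

theorem update_of_subset (s : PySem.Set String) (xs : List String)
    (h : ∀ x ∈ xs, x ∈ s) : PySem.Set.update s xs = s := by
  rw [PySem.Set.update_eq_append_filter]
  have : (PySem.Set.ofList xs).filter (fun y => !s.contains y) = [] := by
    rw [List.filter_eq_nil_iff]
    intro y hy
    have := h y ((PySem.Set.mem_ofList xs y).mp hy)
    simp [this]
  rw [this, List.append_nil]

-- A's inner loop in closed form
theorem innerA (ps : List (String × String × String)) (lang : String)
    (m : PySem.Dict String (PySem.Set String)) :
    (pvPwt ps).items.foldl (fun m pl =>
        if !(PySem.Set.contains pl.2 lang) then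
          let m := if m.contains lang then m else m.insert lang PySem.Set.empty
          m.modify lang PySem.Set.empty (fun s => PySem.Set.add s pl.1)
        else m) m
      = if (pvMiss ps lang).isEmpty then m
        else m.insert lang (PySem.Set.update (m.getD lang PySem.Set.empty) (pvMiss ps lang)) := by
  simp only [step_norm]
  rw [← List.foldl_filter,
      ← List.foldl_map (f := fun (pl : String × PySem.Set String) => pl.1)
        (g := fun (m : PySem.Dict String (PySem.Set String)) (p : String) =>
          m.modify lang PySem.Set.empty (fun s => PySem.Set.add s p)),
      missA_eq ps lang]
  by_cases h : pvMiss ps lang = []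
  · simp [h]
  · rw [foldl_modify_add _ _ _ h]
    simp [List.isEmpty_iff, h]

-- the two phase-2 loops agree on any accumulator whose entries are already pvMiss values
theorem outer_eq (ps : List (String × String × String)) (langs : List String) :
    ∀ (m : PySem.Dict String (PySem.Set String)),
      (∀ k, m.contains k = true → m.getD k PySem.Set.empty = pvMiss ps k) →
      langs.foldl (fun m lang =>
          if (pvMiss ps lang).isEmpty then m
          else m.insert lang (PySem.Set.update (m.getD lang PySem.Set.empty) (pvMiss ps lang))) m
        = langs.foldl (fun m lang =>
            if !(pvMiss ps lang).isEmpty then m.insert lang (pvMiss ps lang) else m) m := by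
  induction langs with
  | nil => intro m _; rfl
  | cons lang rest ih =>
    intro m hm
    simp only [List.foldl_cons]
    by_cases h : (pvMiss ps lang).isEmpty = true
    · rw [if_pos h, show (!(pvMiss ps lang).isEmpty) = false by simp [h],
        if_neg Bool.false_ne_true]
      exact ih m hm
    · have hb : (!(pvMiss ps lang).isEmpty) = true := by
        simp only [Bool.not_eq_true] at h ⊢
        simp [h]
      have hupd : PySem.Set.update (m.getD lang PySem.Set.empty) (pvMiss ps lang) = pvMiss ps lang := by
        by_cases hc : m.contains lang
        · rw [hm lang hc]
          exact update_of_subset _ _ (fun x hx => hx)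
        · simp only [Bool.not_eq_true] at hc
          rw [PySem.Dict.getD_of_not_contains m PySem.Set.empty hc, PySem.Set.update_empty,
            PySem.Set.ofList_eq_self_of_nodup _ (nodup_miss ps lang)]
      rw [if_neg h, hupd, if_pos hb]
      apply ih
      intro k hk
      rw [PySem.Dict.getD_insert]
      by_cases hkl : k = lang
      · subst hkl; rw [if_pos rfl]
      · rw [if_neg hkl]
        apply hm
        rw [PySem.Dict.contains_insert] at hk
        simpa [hkl] using hk

-- ===== VERDICT (by name: the statement is the Claim_ definition above) =====
theorem get_properties_without_translations_in_languages_spec : Claim_equal_get_properties_without_translations_in_languages := by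
  intro properties languages _
  unfold Spec_get_properties_without_translations_in_languages
  unfold get_properties_without_translations_in_languages get_properties_without_translations_in_languages_alt
  simp only [phase1A, phase1B, innerA]
  congr 1
  exact outer_eq properties languages PySem.Dict.empty (by simp [PySem.Dict.contains_empty])
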